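-- pv_equiv track=rewrite | github.com/CoTestAccount/2022-MinPer | MinPer/stanford_parser/load_finfo.py | filter_noun_overclaim_noise
-- ===== SOURCE A (Python) =====
-- def is_verb_noise(line):
--     blacklists = [
--         'privacy policy', 'terms of service', 'privacy', 'policies',
--         'username', 'email address',
--         'log in', 'login',  'cookies',  'password', 'sign', 'please',
--         'agree', 'grant', 'consent', 'widget', ''
--         '?', ':' ,'n\'t',
--         # 'account',
--         ]
--     for word in blacklists:
--         if word in line:
--             return True
--
--     return False
--
-- def remove_empty_sent(lines):
--     results = []
--     for line in lines:
--         if line == '\n':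
--             continue
--         results.append(line)
--     return results
--
-- def filter_verb_overclaim_noise(lines):
--     filtered = []
--     for line in lines:
--         if is_verb_noise(line):
--             continue
--         filtered.append(line)
--     filtered = remove_empty_sent(filtered)
--     return filtered
--
-- def is_noun_noise(line, service_name):
--     blacklist = [
--         'access',  'device', 'service',
--         'ifttt', 'request', 'behalf', 'application', 'app', 'datum',
--          'permission', 'term', 'policy', 'email', 'party app',
--         # 'profile', 'information', 'setting', 'other'
--         ]
--     tks = line.split(' ##  ')
--     noun = tks[len(tks) - 1]
--
--     for word in blacklist:
--         if word in noun:
--             return True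
--
--     # tks = noun.split(' ')
--     # for tk in tks:
--     #     tk = tk.replace('\n', '')
--     #     if tk != '' and tk in service_name:
--     #         return True
--
--     return False
--
-- def filter_noun_overclaim_noise(lines, service_name):
--     filtered_1 = filter_verb_overclaim_noise(lines)
--     filtered_2 = []
--     for line in filtered_1:
--         if is_noun_noise(line, service_name):
--             continue
--         filtered_2.append(line)
--     filtered_2 = remove_empty_sent(filtered_2)
--     return filtered_2
-- ===== SOURCE B (Python) =====
-- VERB_BLACKLIST = (
--     'privacy policy', 'terms of service', 'privacy', 'policies',
--     'username', 'email address',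
--     'log in', 'login', 'cookies', 'password', 'sign', 'please',
--     'agree', 'grant', 'consent', 'widget',
--     '?', ':', "n't",   # note: A's '' '?' literal concatenation is just '?'
-- )
--
-- NOUN_BLACKLIST = (
--     'access', 'device', 'service',
--     'ifttt', 'request', 'behalf', 'application', 'app', 'datum',
--     'permission', 'term', 'policy', 'email', 'party app',
-- )
--
-- def _keep(line):
--     if line == '\n':
--         return False
--     if any(w in line for w in VERB_BLACKLIST):
--         return False
--     noun = line.split(' ##  ')[-1]
--     return not any(w in noun for w in NOUN_BLACKLIST)
--
-- def filter_noun_overclaim_noise(lines, service_name):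
--     # single pass; service_name is unused (as in A)
--     return [line for line in lines if _keep(line)]
-- ===== Notes on version B (the rewrite author's own statement) =====
-- stated objective: simpler
-- what changed: Collapses A's four sequential list passes (verb filter, empty-line pass, noun filter, second empty-line pass) into one comprehension with a single keep-predicate; the predicate inlines both blacklist checks and the '\n' test, and the redundant second empty-line pass disappears.
import Mathlib
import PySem

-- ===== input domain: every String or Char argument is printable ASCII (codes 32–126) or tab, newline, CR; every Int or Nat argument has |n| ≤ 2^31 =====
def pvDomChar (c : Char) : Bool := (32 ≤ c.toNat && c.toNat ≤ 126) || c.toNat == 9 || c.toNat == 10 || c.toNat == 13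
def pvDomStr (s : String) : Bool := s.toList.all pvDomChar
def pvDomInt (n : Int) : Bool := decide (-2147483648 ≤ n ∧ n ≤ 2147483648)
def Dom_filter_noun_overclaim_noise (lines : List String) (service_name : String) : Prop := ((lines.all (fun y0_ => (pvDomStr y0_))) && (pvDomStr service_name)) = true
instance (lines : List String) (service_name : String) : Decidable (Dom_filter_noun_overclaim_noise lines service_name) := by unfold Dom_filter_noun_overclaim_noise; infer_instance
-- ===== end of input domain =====

-- B collapses A's four sequential passes into one pass with a single keep-predicate (objective: simpler).

-- ===== PORT A =====
-- tks[len(tks)-1] on a list, as A writes it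
def pvLastTokOf (tks : List String) : String :=
  (PySem.List.pyGet? tks ((tks.length : Int) - 1)).getD ""

-- is_verb_noise: the '' '?' implicit concatenation in A's source yields the single entry "?".
def pvVerbBlacklists : List String :=
  ["privacy policy", "terms of service", "privacy", "policies",
   "username", "email address",
   "log in", "login", "cookies", "password", "sign", "please",
   "agree", "grant", "consent", "widget",
   "?", ":", "n't"]

def is_verb_noise (line : String) : Bool :=
  pvVerbBlacklists.any (fun word => PySem.Str.isIn word line)

def remove_empty_sent (lines : List String) : List String :=
  lines.foldl (fun results line => if line == "\n" then results else results ++ [line]) []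

def filter_verb_overclaim_noise (lines : List String) : List String :=
  remove_empty_sent
    (lines.foldl (fun filtered line => if is_verb_noise line then filtered else filtered ++ [line]) [])

def pvNounBlacklist : List String :=
  ["access", "device", "service",
   "ifttt", "request", "behalf", "application", "app", "datum",
   "permission", "term", "policy", "email", "party app"]

-- tks = line.split(' ##  '); noun = tks[len(tks)-1] (split? never returns none for a nonempty sep,
-- and its result is never empty, so the index is always in range)
def pvLastTok (line : String) : String :=
  pvLastTokOf ((PySem.Str.split? line " ##  ").getD [])

def is_noun_noise (line : String) (_service_name : String) : Bool :=
  pvNounBlacklist.any (fun word => PySem.Str.isIn word (pvLastTok line))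

def filter_noun_overclaim_noise (lines : List String) (service_name : String) : List String :=
  let filtered_1 := filter_verb_overclaim_noise lines
  remove_empty_sent
    (filtered_1.foldl (fun filtered_2 line => if is_noun_noise line service_name then filtered_2 else filtered_2 ++ [line]) [])

-- ===== PORT B =====
def pvKeepLine (line : String) : Bool :=
  if line == "\n" then false
  else if pvVerbBlacklists.any (fun w => PySem.Str.isIn w line) then false
  else !(pvNounBlacklist.any (fun w =>
    PySem.Str.isIn w (((PySem.Str.split? line " ##  ").getD []).getLastD "")))

def filter_noun_overclaim_noise_alt (lines : List String) (service_name : String) : List String :=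
  lines.filter pvKeepLine

-- ===== PRECONDITION & SPEC =====
def Spec_filter_noun_overclaim_noise (lines : List String) (service_name : String) (out : List String) : Prop := out = filter_noun_overclaim_noise_alt lines service_name
instance (lines : List String) (service_name : String) (out : List String) : Decidable (Spec_filter_noun_overclaim_noise lines service_name out) := by unfold Spec_filter_noun_overclaim_noise; infer_instance

-- ===== CLAIM (what is proved, stated in full; the proofs are below) =====
def Claim_equal_filter_noun_overclaim_noise : Prop := ∀ (lines : List String) (service_name : String), Dom_filter_noun_overclaim_noise lines service_name → Spec_filter_noun_overclaim_noise lines service_name (filter_noun_overclaim_noise lines service_name)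

-- ===== LEMMAS AND PROOFS =====

-- 'for x: if p(x): continue; out.append(x)' is a filter by ¬p
theorem foldl_skip_if_eq_filter {α : Type} (p : α → Bool) (l : List α) (acc : List α) :
    l.foldl (fun acc x => if p x then acc else acc ++ [x]) acc = acc ++ l.filter (fun x => !p x) := by
  induction l generalizing acc with
  | nil => simp
  | cons x xs ih =>
    by_cases h : p x = true <;> simp [List.foldl_cons, h, ih]

theorem pyGet_last_eq_getLast (tks : List String) :
    pvLastTokOf tks = tks.getLastD "" := by
  unfold pvLastTokOf
  cases tks with
  | nil => simp [PySem.List.pyGet?, PySem.List.pyIdx?, List.getLast]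
  | cons x xs =>
    have hc : (((x :: xs).length : Int) - 1) = (((x :: xs).length - 1 : Nat) : Int) := by
      simp
    rw [hc, PySem.List.pyGet?_natCast, ← List.getLast?_eq_getElem?, List.getLastD_eq_getLast?]

theorem verdict_aux (lines : List String) (service_name : String) :
    filter_noun_overclaim_noise lines service_name = filter_noun_overclaim_noise_alt lines service_name := by
  unfold filter_noun_overclaim_noise filter_noun_overclaim_noise_alt
      filter_verb_overclaim_noise remove_empty_sent
  simp only [foldl_skip_if_eq_filter, List.nil_append, List.filter_filter]
  apply List.filter_congr
  intro x _
  unfold pvKeepLine is_verb_noise is_noun_noise pvLastTok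
  rw [pyGet_last_eq_getLast]
  cases he : (x == "\n") <;>
    cases hv : pvVerbBlacklists.any (fun word => PySem.Str.isIn word x) <;>
    cases hn : pvNounBlacklist.any (fun word =>
      PySem.Str.isIn word (((PySem.Str.split? x " ##  ").getD []).getLastD "")) <;>
    simp [he, hv, hn]

-- ===== VERDICT (by name: the statement is the Claim_ definition above) =====
theorem filter_noun_overclaim_noise_spec : Claim_equal_filter_noun_overclaim_noise := by
  intro lines service_name _
  exact verdict_aux lines service_name
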